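-- pv_equiv track=rewrite | github.com/benrose258/Python | Python 2.7 Files/Classwork/CS 110/Practice exam 3 Document 2.py | snacks
-- ===== SOURCE A (Python) =====
-- def snacks(target,mylist):
--     if mylist == []:
--         return target
--     elif target == 0:
--         return 0
--     elif mylist[0]>target:
--         return snacks(target,mylist[1:])
--     else:
--         useIt = snacks((target-mylist[0]),mylist[1:])
--         loseIt = snacks(target,mylist[1:])
--         return useIt or loseIt
-- ===== SOURCE B (Python) =====
-- def snacks(target, mylist):
--     # Memoized top-down version of the use-it-or-lose-it recursion:
--     # identical results, but each (remaining target, suffix) state is solved once.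
--     memo = {}
--
--     def go(t, rest):
--         if rest == ():
--             return t
--         if t == 0:
--             return 0
--         key = (t, rest)
--         if key in memo:
--             return memo[key]
--         if rest[0] > t:
--             res = go(t, rest[1:])
--         else:
--             useIt = go(t - rest[0], rest[1:])
--             loseIt = go(t, rest[1:])
--             res = useIt or loseIt
--         memo[key] = res
--         return res
--
--     return go(target, tuple(mylist))
-- ===== Notes on version B (the rewrite author's own statement) =====
-- stated objective: alternative
-- what changed: Replaces the naive use-it-or-lose-it double recursion with a memoized recursion that caches the result of every (remaining target, remaining suffix) state in a dictionary, so each distinct state is solved once.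
import Mathlib
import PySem

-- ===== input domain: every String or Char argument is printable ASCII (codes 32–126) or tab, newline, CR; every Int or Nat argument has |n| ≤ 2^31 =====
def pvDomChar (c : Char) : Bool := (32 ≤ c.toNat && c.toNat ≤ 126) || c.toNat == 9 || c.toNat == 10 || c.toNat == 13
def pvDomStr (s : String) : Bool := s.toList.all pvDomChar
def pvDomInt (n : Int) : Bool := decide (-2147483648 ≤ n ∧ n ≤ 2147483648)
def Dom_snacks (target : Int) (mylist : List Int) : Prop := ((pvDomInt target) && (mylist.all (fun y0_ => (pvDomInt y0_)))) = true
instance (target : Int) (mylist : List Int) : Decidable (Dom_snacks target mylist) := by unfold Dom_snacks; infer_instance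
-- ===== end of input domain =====

-- B memoizes the use-it-or-lose-it recursion on (remaining target, remaining suffix)
-- so each distinct state is computed once; same return value.

-- ===== PORT A =====
def snacks (target : Int) (mylist : List Int) : Int :=
  match mylist with
  | [] => target
  | x :: rest =>
    if target = 0 then 0
    else if x > target then snacks target rest
    else
      let useIt := snacks (target - x) rest
      let loseIt := snacks target rest
      if useIt ≠ 0 then useIt else loseIt

-- ===== PORT B =====
-- the memo dictionary: key = (remaining target, remaining suffix), value = result
def snacksGo (t : Int) (rest : List Int) (memo : PySem.Dict (Int × List Int) Int) :
    Int × PySem.Dict (Int × List Int) Int :=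
  match rest with
  | [] => (t, memo)
  | x :: rs =>
    if t = 0 then (0, memo)
    else
      match memo.get? (t, x :: rs) with
      | some v => (v, memo)
      | none =>
        let pr :=
          if x > t then snacksGo t rs memo
          else
            let u := snacksGo (t - x) rs memo
            let l := snacksGo t rs u.2
            ((if u.1 ≠ 0 then u.1 else l.1), l.2)
        (pr.1, pr.2.insert (t, x :: rs) pr.1)

def snacks_alt (target : Int) (mylist : List Int) : Int :=
  (snacksGo target mylist PySem.Dict.empty).1

-- ===== PRECONDITION & SPEC =====
def Spec_snacks (target : Int) (mylist : List Int) (out : Int) : Prop := out = snacks_alt target mylist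
instance (target : Int) (mylist : List Int) (out : Int) : Decidable (Spec_snacks target mylist out) := by unfold Spec_snacks; infer_instance

-- ===== CLAIM (what is proved, stated in full; the proofs are below) =====
def Claim_equal_snacks : Prop := ∀ (target : Int) (mylist : List Int), Dom_snacks target mylist → Spec_snacks target mylist (snacks target mylist)

-- ===== LEMMAS AND PROOFS =====

-- memo invariant: every cached value is the value of A's recursion at its key
def MemoOK (m : PySem.Dict (Int × List Int) Int) : Prop :=
  ∀ p ∈ m.items, p.2 = snacks p.1.1 p.1.2

theorem memoOK_empty : MemoOK PySem.Dict.empty := by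
  intro p hp
  simp [PySem.Dict.empty] at hp

theorem snacksGo_correct (rest : List Int) :
    ∀ (t : Int) (memo : PySem.Dict (Int × List Int) Int), MemoOK memo →
      (snacksGo t rest memo).1 = snacks t rest ∧ MemoOK (snacksGo t rest memo).2 := by
  induction rest with
  | nil =>
    intro t memo h
    exact ⟨rfl, h⟩
  | cons x rs ih =>
    intro t memo h
    by_cases ht : t = 0
    · subst ht
      constructor
      · simp [snacksGo, snacks]
      · simpa [snacksGo] using h
    · rcases hg : memo.get? (t, x :: rs) with _ | v
      · -- cache miss
        by_cases hx : x > t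
        · obtain ⟨hv, hm⟩ := ih t memo h
          have hval : (snacksGo t (x :: rs) memo).1 = snacks t (x :: rs) := by
            simp [snacksGo, snacks, ht, hg, hx, hv]
          refine ⟨hval, ?_⟩
          intro p hp
          have : (snacksGo t (x :: rs) memo).2
              = ((snacksGo t rs memo).2).insert (t, x :: rs) (snacksGo t rs memo).1 := by
            simp [snacksGo, ht, hg, hx]
          rw [this] at hp
          rcases (PySem.Dict.mem_items_insert _ _ _ p).1 hp with h1 | h2
          · subst h1
            show (snacksGo t rs memo).1 = snacks t (x :: rs)
            rw [hv]; simp [snacks, ht, hx]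
          · exact hm p h2.1
        · obtain ⟨hu, hm1⟩ := ih (t - x) memo h
          obtain ⟨hl, hm2⟩ := ih t (snacksGo (t - x) rs memo).2 hm1
          have hval : (snacksGo t (x :: rs) memo).1 = snacks t (x :: rs) := by
            simp [snacksGo, snacks, ht, hg, hx, hu, hl]
          refine ⟨hval, ?_⟩
          intro p hp
          have : (snacksGo t (x :: rs) memo).2
              = ((snacksGo t rs (snacksGo (t - x) rs memo).2).2).insert (t, x :: rs)
                  (snacksGo t (x :: rs) memo).1 := by
            simp [snacksGo, ht, hg, hx]
          rw [this] at hp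
          rcases (PySem.Dict.mem_items_insert _ _ _ p).1 hp with h1 | h2
          · subst h1
            exact hval
          · exact hm2 p h2.1
      · -- cache hit: the invariant says the stored value is snacks at the key
        have hmem := PySem.Dict.mem_items_of_get?_eq_some _ hg
        have hv := h _ hmem
        constructor
        · simp only [snacksGo, if_neg ht, hg]
          exact hv
        · simpa [snacksGo, ht, hg] using h

-- ===== VERDICT (by name: the statement is the Claim_ definition above) =====
theorem snacks_spec : Claim_equal_snacks := by
  intro target mylist _
  unfold Spec_snacks snacks_alt
  exact ((snacksGo_correct mylist target PySem.Dict.empty memoOK_empty).1).symm
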